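-- pv_equiv track=rewrite | github.com/MNico99/Sintaxis-TP01 | GLex.py | A_Numeros
-- ===== SOURCE A (Python) =====
-- TRAMPA = -1
--
-- RESULTADO_ACEPTADO = "ACEPTADO"
--
-- RESULTADO_TRAMPA = "TRAMPA"
--
-- RESULTADO_NO_ACEPTADO = "NO_ACEPTADO"
--
-- digito = ["0", "1", "2", "3", "4", "5", "6", "7", "8", "9"]
--
-- def d_Numeros(estado_anterior, caracter):
--     if estado_anterior == 0 and caracter in digito:
--         return 1
--     if estado_anterior == 1 and caracter in digito:
--         return 1
--     if estado_anterior == 1 and caracter == ".":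
--         return 2
--     if estado_anterior == 2 and caracter in digito:
--         return 3
--     if estado_anterior == 3 and caracter in digito:
--         return 3
--
--
--     return TRAMPA
--
-- def A_Numeros(cadena):
--     Finales = [1, 3]
--     estado_actual = 0
--
--     for caracter in cadena:
--         estado_proximo = d_Numeros(estado_actual, caracter)
--         if estado_proximo == TRAMPA:
--             return RESULTADO_TRAMPA
--         estado_actual = estado_proximo
--
--     if estado_actual in Finales:
--         return RESULTADO_ACEPTADO
--     else:
--         return RESULTADO_NO_ACEPTADO
-- ===== SOURCE B (Python) =====
-- digito = ["0", "1", "2", "3", "4", "5", "6", "7", "8", "9"]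
--
-- RESULTADO_ACEPTADO = "ACEPTADO"
-- RESULTADO_TRAMPA = "TRAMPA"
-- RESULTADO_NO_ACEPTADO = "NO_ACEPTADO"
--
-- def A_Numeros(cadena):
--     if cadena == "":
--         return RESULTADO_NO_ACEPTADO
--     partes = cadena.split(".")
--     if len(partes) == 1:
--         return RESULTADO_ACEPTADO if all(c in digito for c in partes[0]) else RESULTADO_TRAMPA
--     if len(partes) == 2:
--         entera, frac = partes
--         if entera and all(c in digito for c in entera) and all(c in digito for c in frac):
--             return RESULTADO_ACEPTADO if frac else RESULTADO_NO_ACEPTADO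
--         return RESULTADO_TRAMPA
--     return RESULTADO_TRAMPA
-- ===== Notes on version B (the rewrite author's own statement) =====
-- stated objective: simpler
-- what changed: Replaces the explicit DFA transition loop with a split-on-the-dot-separator structural check: validate the integer and fractional parts directly (empty string and empty fraction give NO_ACEPTADO, anything else invalid gives TRAMPA).
import Mathlib
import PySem

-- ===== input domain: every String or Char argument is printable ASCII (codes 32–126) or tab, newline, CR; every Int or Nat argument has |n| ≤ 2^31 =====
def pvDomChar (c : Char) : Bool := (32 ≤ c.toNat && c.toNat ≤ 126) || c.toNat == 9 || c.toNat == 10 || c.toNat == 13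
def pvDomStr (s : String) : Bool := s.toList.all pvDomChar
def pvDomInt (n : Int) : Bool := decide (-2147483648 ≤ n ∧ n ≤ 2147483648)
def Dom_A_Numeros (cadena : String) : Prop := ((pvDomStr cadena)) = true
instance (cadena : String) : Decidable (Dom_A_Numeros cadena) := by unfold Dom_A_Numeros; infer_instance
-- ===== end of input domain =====

-- B replaces A's character-by-character DFA with a split-on-'.'-and-validate structural check (objective: simpler).

-- ===== PORT A =====
def pvDigito : List Char := ['0', '1', '2', '3', '4', '5', '6', '7', '8', '9']

def d_Numeros (estado_anterior : Int) (caracter : Char) : Int :=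
  if estado_anterior = 0 ∧ pvDigito.contains caracter then 1
  else if estado_anterior = 1 ∧ pvDigito.contains caracter then 1
  else if estado_anterior = 1 ∧ caracter = '.' then 2
  else if estado_anterior = 2 ∧ pvDigito.contains caracter then 3
  else if estado_anterior = 3 ∧ pvDigito.contains caracter then 3
  else (-1)

-- A's for-loop with early return, as structural recursion over the characters
def A_Numeros_loop (estado_actual : Int) : List Char → String
  | [] => if ([1, 3] : List Int).contains estado_actual then "ACEPTADO" else "NO_ACEPTADO"
  | c :: cs =>
    let estado_proximo := d_Numeros estado_actual c
    if estado_proximo = -1 then "TRAMPA" else A_Numeros_loop estado_proximo cs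

def A_Numeros (cadena : String) : String := A_Numeros_loop 0 cadena.toList

-- ===== PORT B =====
-- hand port of Python str.split(".") (exact for a one-character separator: "".split(".") = [""],
-- and each '.' starts a fresh piece)
def pvSplitDot : List Char → List (List Char)
  | [] => [[]]
  | c :: cs =>
    if c = '.' then [] :: pvSplitDot cs
    else
      match pvSplitDot cs with
      | [] => [[c]]
      | p :: ps => (c :: p) :: ps

def A_Numeros_alt (cadena : String) : String :=
  if cadena = "" then "NO_ACEPTADO"
  else
    let partes := pvSplitDot cadena.toList
    match partes with
    | [p] => if p.all pvDigito.contains then "ACEPTADO" else "TRAMPA"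
    | [entera, frac] =>
      if entera ≠ [] ∧ entera.all pvDigito.contains ∧ frac.all pvDigito.contains then
        if frac = [] then "NO_ACEPTADO" else "ACEPTADO"
      else "TRAMPA"
    | _ => "TRAMPA"

-- ===== PRECONDITION & SPEC =====
def Spec_A_Numeros (cadena : String) (out : String) : Prop := out = A_Numeros_alt cadena
instance (cadena : String) (out : String) : Decidable (Spec_A_Numeros cadena out) := by unfold Spec_A_Numeros; infer_instance

-- ===== CLAIM (what is proved, stated in full; the proofs are below) =====
def Claim_equal_A_Numeros : Prop := ∀ (cadena : String), Dom_A_Numeros cadena → Spec_A_Numeros cadena (A_Numeros cadena)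

-- ===== LEMMAS AND PROOFS =====

lemma pvSplitDot_ne_nil (cs : List Char) : pvSplitDot cs ≠ [] := by
  cases cs with
  | nil => simp [pvSplitDot]
  | cons c cs =>
    simp only [pvSplitDot]
    split_ifs
    · simp
    · cases pvSplitDot cs <;> simp

-- value of A's loop started in state 3 (fraction, after a fraction digit)
lemma loop3 (cs : List Char) :
    A_Numeros_loop 3 cs = if cs.all pvDigito.contains then "ACEPTADO" else "TRAMPA" := by
  induction cs with
  | nil => simp [A_Numeros_loop]
  | cons c cs ih =>
    by_cases hd : c ∈ pvDigito <;>
      simp [A_Numeros_loop, d_Numeros, hd, ih]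

-- value of A's loop started in state 2 (just after the dot)
lemma loop2 (cs : List Char) :
    A_Numeros_loop 2 cs =
      if cs = [] then "NO_ACEPTADO"
      else if cs.all pvDigito.contains then "ACEPTADO" else "TRAMPA" := by
  cases cs with
  | nil => simp [A_Numeros_loop]
  | cons c cs =>
    by_cases hd : c ∈ pvDigito <;>
      simp [A_Numeros_loop, d_Numeros, hd, loop3]

-- result of B's validation of the split parts when the loop is in state 2
def spec2 : List (List Char) → String
  | [q] => if q = [] then "NO_ACEPTADO" else if q.all pvDigito.contains then "ACEPTADO" else "TRAMPA"
  | _ => "TRAMPA"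

-- result of B's validation of the split parts when the loop is in state 1
def spec1 : List (List Char) → String
  | [p] => if p.all pvDigito.contains then "ACEPTADO" else "TRAMPA"
  | [p, q] =>
    if p.all pvDigito.contains ∧ q.all pvDigito.contains then
      if q = [] then "NO_ACEPTADO" else "ACEPTADO"
    else "TRAMPA"
  | _ => "TRAMPA"

lemma loop2_spec (cs : List Char) : A_Numeros_loop 2 cs = spec2 (pvSplitDot cs) := by
  rw [loop2]
  induction cs with
  | nil => simp [pvSplitDot, spec2]
  | cons c cs ih =>
    by_cases hc : c = '.'
    · subst hc
      have hnd : '.' ∉ pvDigito := by decide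
      rcases hq : pvSplitDot cs with _ | ⟨p, ps⟩
      · exact absurd hq (pvSplitDot_ne_nil cs)
      · simp [pvSplitDot, hq, spec2, hnd]
    · rcases hq : pvSplitDot cs with _ | ⟨p, _ | ⟨q, ps⟩⟩
      · exact absurd hq (pvSplitDot_ne_nil cs)
      · -- no dot in cs: pvSplitDot cs = [p] and cs = p
        have hp : cs = p := by
          clear ih
          induction cs generalizing p with
          | nil => simp [pvSplitDot] at hq; simp [hq]
          | cons d ds ihd =>
            by_cases hdd : d = '.'
            · simp [pvSplitDot, hdd] at hq
              exact absurd hq.2 (pvSplitDot_ne_nil ds)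
            · rcases hr : pvSplitDot ds with _ | ⟨r, rs⟩
              · exact absurd hr (pvSplitDot_ne_nil ds)
              · simp [pvSplitDot, hdd, hr] at hq
                rcases hq with ⟨hq1, hq2⟩
                subst hq2
                simp [← hq1, ihd r hr]
        subst hp
        by_cases hd : c ∈ pvDigito <;>
          simp [pvSplitDot, hc, hq, spec2, hd]
      · -- at least one dot in cs: cs is not all digits (it contains '.')
        have hdot : ('.' ∈ cs) := by
          clear ih
          induction cs generalizing p q ps with
          | nil => simp [pvSplitDot] at hq
          | cons d ds ihd =>
            by_cases hdd : d = '.'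
            · simp [hdd]
            · rcases hr : pvSplitDot ds with _ | ⟨r, _ | ⟨s, ss⟩⟩
              · exact absurd hr (pvSplitDot_ne_nil ds)
              · simp [pvSplitDot, hdd, hr] at hq
              · simp [pvSplitDot, hdd, hr] at hq
                exact List.mem_cons_of_mem _ (ihd r s ss hr)
        have hna : cs.all pvDigito.contains = false := by
          simp only [List.all_eq_false]
          exact ⟨'.', hdot, by decide⟩
        by_cases hd : c ∈ pvDigito <;>
          simp [pvSplitDot, hc, hq, spec2, hna, hd]

lemma spec1_nil_cons (ps : List (List Char)) (h : ps ≠ []) :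
    spec1 ([] :: ps) = spec2 ps := by
  rcases ps with _ | ⟨q, _ | qs⟩
  · exact absurd rfl h
  · rcases hq : q with _ | _ <;> by_cases ha : q.all pvDigito.contains = true <;>
      simp_all [spec1, spec2]
  · simp [spec1, spec2]

lemma loop1_spec (cs : List Char) : A_Numeros_loop 1 cs = spec1 (pvSplitDot cs) := by
  induction cs with
  | nil => simp [A_Numeros_loop, pvSplitDot, spec1]
  | cons c cs ih =>
    by_cases hc : c = '.'
    · subst hc
      have h1 : A_Numeros_loop 1 ('.' :: cs) = A_Numeros_loop 2 cs := by
        simp [A_Numeros_loop, d_Numeros, (by decide : ¬ ('.' ∈ pvDigito))]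
      rw [h1, loop2_spec, show pvSplitDot ('.' :: cs) = [] :: pvSplitDot cs from by simp [pvSplitDot]]
      exact (spec1_nil_cons _ (pvSplitDot_ne_nil cs)).symm
    · rcases hq : pvSplitDot cs with _ | ⟨p, ps⟩
      · exact absurd hq (pvSplitDot_ne_nil cs)
      · by_cases hd : c ∈ pvDigito
        · have : A_Numeros_loop 1 (c :: cs) = A_Numeros_loop 1 cs := by
            simp [A_Numeros_loop, d_Numeros, hd]
          rw [this, ih, hq]
          rcases ps with _ | ⟨q, qs⟩ <;>
            simp [pvSplitDot, hc, hq, spec1, hd] <;>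
            rcases qs with _ | _ <;> simp [spec1, hd]
        · have htr : A_Numeros_loop 1 (c :: cs) = "TRAMPA" := by
            simp [A_Numeros_loop, d_Numeros, hd, hc]
          have hna : (c :: p).all pvDigito.contains = false := by simp [hd]
          rw [htr]
          rcases ps with _ | ⟨q, _ | qs⟩ <;>
            simp [pvSplitDot, hc, hq, spec1, hna, hd]

lemma main_list (cs : List Char) (h : cs ≠ []) :
    A_Numeros_loop 0 cs =
      (match pvSplitDot cs with
        | [p] => if p.all pvDigito.contains then "ACEPTADO" else "TRAMPA"
        | [entera, frac] =>
          if entera ≠ [] ∧ entera.all pvDigito.contains ∧ frac.all pvDigito.contains then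
            if frac = [] then "NO_ACEPTADO" else "ACEPTADO"
          else "TRAMPA"
        | _ => "TRAMPA") := by
  rcases cs with _ | ⟨c, cs⟩
  · exact absurd rfl h
  · by_cases hc : c = '.'
    · subst hc
      have h0 : A_Numeros_loop 0 ('.' :: cs) = "TRAMPA" := by
        simp [A_Numeros_loop, d_Numeros, (by decide : ¬ ('.' ∈ pvDigito))]
      rw [h0, show pvSplitDot ('.' :: cs) = [] :: pvSplitDot cs from by simp [pvSplitDot]]
      rcases hq : pvSplitDot cs with _ | ⟨p, _ | ps⟩
      · exact absurd hq (pvSplitDot_ne_nil cs)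
      · simp
      · simp
    · rcases hq : pvSplitDot cs with _ | ⟨p, ps⟩
      · exact absurd hq (pvSplitDot_ne_nil cs)
      · by_cases hd : c ∈ pvDigito
        · have h0 : A_Numeros_loop 0 (c :: cs) = A_Numeros_loop 1 cs := by
            simp [A_Numeros_loop, d_Numeros, hd]
          rw [h0, loop1_spec, hq]
          rcases ps with _ | ⟨q, _ | qs⟩ <;>
            simp [pvSplitDot, hc, hq, spec1, hd]
        · have h0 : A_Numeros_loop 0 (c :: cs) = "TRAMPA" := by
            simp [A_Numeros_loop, d_Numeros, hd, hc]
          have hna : (c :: p).all pvDigito.contains = false := by simp [hd]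
          rw [h0]
          rcases ps with _ | ⟨q, _ | qs⟩ <;>
            simp [pvSplitDot, hc, hq, hna, hd]

-- ===== VERDICT (by name: the statement is the Claim_ definition above) =====
theorem A_Numeros_spec : Claim_equal_A_Numeros := by
  intro cadena _
  unfold Spec_A_Numeros A_Numeros A_Numeros_alt
  by_cases he : cadena = ""
  · subst he; decide
  · have hne : cadena.toList ≠ [] := by
      intro h
      exact he (String.toList_eq_nil_iff.mp h)
    rw [main_list cadena.toList hne]
    simp [he]
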